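-- pv_equiv track=rewrite | github.com/federico-galli/win-app-analyzer | appanalyzer.py | parselog
-- ===== SOURCE A (Python) =====
-- app_match=["name","microsoft","google","python","adobe","apple","office",
-- "windows","intel","dell","vnc","vpn","icloud","bonjour","smartbyte","calibre",
-- "texturepacker","mtg arena","ibm aspera connect","spark ar studio","affinity designer",
-- "affinity photo","slack","teams machine-wide installer","4k video downloader",
-- "4k stogram","blender","cyberduck"]
--
-- def parselog(log):
-- #for each line of the log checks if an app from the list is matched. If not, increments
-- #i counter. When the counter matches the lenght of the list, it means that the line is never
-- #matched. This is what we are looking for. Then adds to parsedlog list to return.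
--   i=0
--   parsedlog=[]
--
--   for line in log.splitlines():
--     for app in app_match:
--       if app not in str(line.lower()):
--         i += 1
--         if len(app_match) == i:
--           parsedlog.append(line.strip())
--           i = 0
--       else:
--         i = 0
--         break
--
--   parsedlog = list(filter(None, parsedlog)) # clean empty elements
--   return parsedlog
-- ===== SOURCE B (Python) =====
-- app_match=["name","microsoft","google","python","adobe","apple","office",
-- "windows","intel","dell","vnc","vpn","icloud","bonjour","smartbyte","calibre",
-- "texturepacker","mtg arena","ibm aspera connect","spark ar studio","affinity designer",
-- "affinity photo","slack","teams machine-wide installer","4k video downloader",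
-- "4k stogram","blender","cyberduck"]
--
-- def parselog(log):
--   # mark-then-sweep with swapped loop nesting: the OUTER loop runs over the app
--   # names, each pass OR-ing "this app occurs" into a per-line boolean mask;
--   # afterwards one sweep keeps the stripped, non-empty unmarked lines.
--   lines = log.splitlines()
--   lows = [line.lower() for line in lines]
--   matched = [False] * len(lines)
--   for app in app_match:
--     matched = [m or (app in low) for m, low in zip(matched, lows)]
--   kept = [line.strip() for line, m in zip(lines, matched) if not m]
--   return [s for s in kept if s]
-- ===== Notes on version B (the rewrite author's own statement) =====
-- stated objective: alternative
-- what changed: Swaps the loop nesting: instead of A's per-line inner scan over the app list with a counter-until-full and break, B runs the app list in the OUTER loop, each app pass OR-ing its occurrence into a per-line boolean mask over pre-lowered lines, and a final sweep keeps the stripped non-empty unmarked lines.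
import Mathlib
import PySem

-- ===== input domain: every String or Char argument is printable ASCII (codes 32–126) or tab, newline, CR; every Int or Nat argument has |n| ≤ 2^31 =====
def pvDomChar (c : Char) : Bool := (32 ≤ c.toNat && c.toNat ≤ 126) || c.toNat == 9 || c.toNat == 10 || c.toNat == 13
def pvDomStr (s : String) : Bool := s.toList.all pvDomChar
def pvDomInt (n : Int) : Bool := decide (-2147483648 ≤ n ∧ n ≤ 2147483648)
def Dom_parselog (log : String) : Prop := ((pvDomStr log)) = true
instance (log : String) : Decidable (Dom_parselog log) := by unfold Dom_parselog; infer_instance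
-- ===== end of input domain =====

-- B swaps the loop nesting: the app list runs in the OUTER loop, OR-ing each app's
-- occurrence into a per-line boolean mask, then one sweep keeps the stripped,
-- non-empty unmarked lines (objective: alternative).

-- ===== PORT A =====
def app_match : List String := ["name","microsoft","google","python","adobe","apple","office",
"windows","intel","dell","vnc","vpn","icloud","bonjour","smartbyte","calibre",
"texturepacker","mtg arena","ibm aspera connect","spark ar studio","affinity designer",
"affinity photo","slack","teams machine-wide installer","4k video downloader",
"4k stogram","blender","cyberduck"]

-- inner `for app in app_match:` loop with its break; state (i, parsedlog)
def parselogInner (line : String) : List String → Int → List String → Int × List String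
  | [], i, pl => (i, pl)
  | app :: rest, i, pl =>
    if !(PySem.Str.isIn app (PySem.Str.lower line)) then
      let i' := i + 1
      if ((app_match.length : Int) = i') then
        parselogInner line rest 0 (pl ++ [PySem.Str.strip line])
      else
        parselogInner line rest i' pl
    else (0, pl)

def parselog (log : String) : List String :=
  let st := (PySem.Str.splitlines log).foldl
    (fun st line => parselogInner line app_match st.1 st.2) ((0 : Int), ([] : List String))
  -- list(filter(None, parsedlog)): a str is truthy iff non-empty
  st.2.filter (fun s => s ≠ "")

-- ===== PORT B =====
def parselog_alt (log : String) : List String :=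
  let lines := PySem.Str.splitlines log
  let lows := lines.map PySem.Str.lower
  let matched := app_match.foldl
    (fun matched app => List.zipWith (fun m low => m || PySem.Str.isIn app low) matched lows)
    (List.replicate lines.length false)
  let kept := ((lines.zip matched).filter (fun p => !p.2)).map (fun p => PySem.Str.strip p.1)
  kept.filter (fun s => s ≠ "")

-- ===== PRECONDITION & SPEC =====
def Spec_parselog (log : String) (out : List String) : Prop := out = parselog_alt log
instance (log : String) (out : List String) : Decidable (Spec_parselog log out) := by unfold Spec_parselog; infer_instance

-- ===== CLAIM (what is proved, stated in full; the proofs are below) =====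
def Claim_equal_parselog : Prop := ∀ (log : String), Dom_parselog log → Spec_parselog log (parselog log)

-- ===== LEMMAS AND PROOFS =====

-- A side: if no app in the remaining list matches and the counter will reach len(app_match), the line gets appended
theorem parselogInner_nomatch (l : List String) (line : String) :
    ∀ (i : Int) (pl : List String),
    (∀ a ∈ l, PySem.Chars.isIn a.toList (PySem.Chars.lower line.toList) = false) →
    i + l.length = (app_match.length : Int) → 0 < l.length →
    parselogInner line l i pl = (0, pl ++ [PySem.Str.strip line]) := by
  induction l with
  | nil => intro i pl _ _ h; simp at h
  | cons a rest ih =>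
    intro i pl hall hlen _
    have hb : (!(PySem.Str.isIn a (PySem.Str.lower line))) = true := by
      simp [hall a (by simp)]
    simp only [parselogInner]
    rw [if_pos hb]
    rcases List.eq_nil_or_concat' rest with h | h
    · subst h
      have : (app_match.length : Int) = i + 1 := by simp at hlen ⊢; omega
      simp [this, parselogInner]
    · have hne : rest ≠ [] := by rcases h with ⟨_, _, h⟩; simp [h]
      have hlt : 0 < rest.length := List.length_pos_iff.mpr hne
      have hni : ¬ ((app_match.length : Int) = i + 1) := by
        simp only [List.length_cons] at hlen; push_cast at hlen ⊢; omega
      rw [if_neg hni]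
      exact ih (i + 1) pl (fun a ha => hall a (by simp [ha]))
        (by simp only [List.length_cons] at hlen; push_cast at hlen ⊢; omega) hlt

-- A side: if some app in the remaining list matches, break with i = 0
theorem parselogInner_match (l : List String) (line : String) :
    ∀ (i : Int) (pl : List String),
    (∃ a ∈ l, PySem.Chars.isIn a.toList (PySem.Chars.lower line.toList) = true) →
    0 ≤ i → i + l.length ≤ (app_match.length : Int) →
    parselogInner line l i pl = (0, pl) := by
  induction l with
  | nil => intro i pl h _ _; simp at h
  | cons a rest ih =>
    intro i pl hex hi hlen
    simp only [parselogInner]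
    by_cases ha : PySem.Chars.isIn a.toList (PySem.Chars.lower line.toList) = true
    · rw [if_neg (by simp [ha])]
    · have ha' : PySem.Chars.isIn a.toList (PySem.Chars.lower line.toList) = false :=
        Bool.eq_false_iff.mpr ha
      rw [if_pos (by simp [ha'])]
      have hex' : ∃ b ∈ rest, PySem.Chars.isIn b.toList (PySem.Chars.lower line.toList) = true := by
        rcases hex with ⟨b, hb, hbt⟩
        rcases List.mem_cons.mp hb with h | h
        · exact absurd (h ▸ hbt) (by simp [ha'])
        · exact ⟨b, h, hbt⟩
      have hne : rest ≠ [] := by rintro rfl; simp at hex'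
      have hlt : 0 < rest.length := List.length_pos_iff.mpr hne
      have hni : ¬ ((app_match.length : Int) = i + 1) := by
        simp only [List.length_cons] at hlen; push_cast at hlen ⊢; omega
      rw [if_neg hni]
      exact ih (i + 1) pl hex' (by omega)
        (by simp only [List.length_cons] at hlen; push_cast at hlen ⊢; omega)

-- A side: one full line of the outer loop, started (as always) with i = 0
theorem parselogInner_line (line : String) (pl : List String) :
    parselogInner line app_match 0 pl =
      (0, if ∃ a ∈ app_match, PySem.Chars.isIn a.toList (PySem.Chars.lower line.toList) = true
          then pl else pl ++ [PySem.Str.strip line]) := by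
  by_cases h : ∃ a ∈ app_match, PySem.Chars.isIn a.toList (PySem.Chars.lower line.toList) = true
  · rw [if_pos h]
    exact parselogInner_match app_match line 0 pl h le_rfl (by simp)
  · rw [if_neg h]
    have hall : ∀ a ∈ app_match, PySem.Chars.isIn a.toList (PySem.Chars.lower line.toList) = false :=
      fun a hmem => Bool.eq_false_iff.mpr (fun hc => h ⟨a, hmem, hc⟩)
    exact parselogInner_nomatch app_match line 0 pl hall (by simp) (by decide)

-- A side: the whole fold produces the "no app occurs" lines, stripped
theorem parselog_fold (lines : List String) :
    ∀ pl : List String,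
    lines.foldl (fun st line => parselogInner line app_match st.1 st.2) ((0 : Int), pl) =
      (0, pl ++ ((lines.filter
          (fun line => ! app_match.any (fun app => PySem.Str.isIn app (PySem.Str.lower line)))).map
        PySem.Str.strip)) := by
  induction lines with
  | nil => intro pl; simp
  | cons line rest ih =>
    intro pl
    rw [List.foldl_cons]
    show (rest.foldl (fun st line => parselogInner line app_match st.1 st.2)
        (parselogInner line app_match 0 pl)) = _
    rw [parselogInner_line]
    by_cases h : ∃ a ∈ app_match, PySem.Chars.isIn a.toList (PySem.Chars.lower line.toList) = true
    · rw [if_pos h, ih]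
      have hne : ¬ (∀ x ∈ app_match, PySem.Chars.isIn x.toList (PySem.Chars.lower line.toList) = false) := by
        rcases h with ⟨a, hm, ht⟩
        intro hall
        rw [hall a hm] at ht
        exact Bool.false_ne_true ht
      simp [hne]
    · rw [if_neg h, ih (pl ++ [PySem.Str.strip line])]
      have hall : ∀ x ∈ app_match, PySem.Chars.isIn x.toList (PySem.Chars.lower line.toList) = false :=
        fun a hm => Bool.eq_false_iff.mpr (fun hc => h ⟨a, hm, hc⟩)
      simp only [List.filter_cons]
      simp only [pysem]
      have hb : (!app_match.any fun app => PySem.Chars.isIn app.toList (PySem.Chars.lower line.toList)) = true := by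
        simp only [Bool.not_eq_true', List.any_eq_false]
        intro a hm
        simp [hall a hm]
      rw [if_pos hb]
      simp

-- B side: fusing two zipWith passes over the same right list
theorem zipWith_zipWith_same {α β γ δ : Type} (f : γ → β → δ) (g : α → β → γ) :
    ∀ (xs : List α) (ys : List β),
    List.zipWith f (List.zipWith g xs ys) ys = List.zipWith (fun a b => f (g a b) b) xs ys := by
  intro xs
  induction xs with
  | nil => intro ys; simp
  | cons x xs ih => intro ys; cases ys <;> simp [ih]

-- B side: a zipWith that ignores the right list is the identity (equal lengths)
theorem zipWith_left_id {α β : Type} :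
    ∀ (xs : List α) (ys : List β), xs.length = ys.length →
    List.zipWith (fun a _ => a) xs ys = xs := by
  intro xs
  induction xs with
  | nil => intro ys _; simp
  | cons x xs ih =>
    intro ys h
    cases ys with
    | nil => simp at h
    | cons y ys => simp [ih ys (by simpa using h)]

-- B side: the outer app fold ORs every app's occurrence into the mask
theorem mask_fold (apps : List String) :
    ∀ (mask : List Bool) (lows : List String), mask.length = lows.length →
    apps.foldl (fun matched app =>
        List.zipWith (fun m low => m || PySem.Str.isIn app low) matched lows) mask =
      List.zipWith (fun m low => m || apps.any (fun a => PySem.Str.isIn a low)) mask lows := by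
  induction apps with
  | nil =>
    intro mask lows h
    simp only [List.foldl_nil, List.any_nil, Bool.or_false]
    exact (zipWith_left_id mask lows h).symm
  | cons a rest ih =>
    intro mask lows h
    rw [List.foldl_cons, ih _ lows (by simp [h]), zipWith_zipWith_same]
    simp [Bool.or_assoc]

-- B side: zipping a list with a boolean map of itself, then filter+map, is filter+map on the list
theorem zip_map_filter (p : String → Bool) :
    ∀ lines : List String,
    (((lines.zip (lines.map p)).filter (fun q => !q.2)).map (fun q => PySem.Str.strip q.1)) =
      (lines.filter (fun line => ! p line)).map PySem.Str.strip := by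
  intro lines
  induction lines with
  | nil => simp
  | cons line rest ih =>
    by_cases h : p line
    · simp [h, ih]
    · simp [h, ih]

-- the mask really is the per-line "some app occurs" predicate
theorem matched_eq (lines : List String) :
    app_match.foldl
      (fun matched app =>
        List.zipWith (fun m low => m || PySem.Str.isIn app low) matched (lines.map PySem.Str.lower))
      (List.replicate lines.length false) =
    lines.map (fun line => app_match.any (fun a => PySem.Str.isIn a (PySem.Str.lower line))) := by
  rw [mask_fold app_match _ _ (by simp)]
  induction lines with
  | nil => simp
  | cons line rest ih => simpa [List.replicate_succ] using ih

-- ===== VERDICT (by name: the statement is the Claim_ definition above) =====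
theorem parselog_spec : Claim_equal_parselog := by
  intro log _
  show parselog log = parselog_alt log
  simp only [parselog, parselog_alt]
  rw [parselog_fold, matched_eq, zip_map_filter]
  simp
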